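-- pv_equiv track=rewrite | github.com/isHarryh/Lanqiao-Exercises | src/43690/MainV2.py | has_hope
-- ===== SOURCE A (Python) =====
-- def has_hope(mat):
--     if mat[1][1] not in (0, 5):
--         return False
--     for idx in range(3):
--         if mat[idx][0] and mat[idx][1] and mat[idx][2]:
--             if sum(mat[idx]) != 15:
--                 return False
--         if mat[0][idx] and mat[1][idx] and mat[2][idx]:
--             if mat[0][idx] + mat[1][idx] + mat[2][idx] != 15:
--                 return False
--     if mat[0][0] and mat[1][1] and mat[2][2]:
--         if mat[0][0] + mat[1][1] + mat[2][2] != 15: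
--             return False
--     if mat[0][2] and mat[1][1] and mat[2][0]:
--         if mat[0][2] + mat[1][1] + mat[2][0] != 15:
--             return False
--     return True
-- ===== SOURCE B (Python) =====
-- def has_hope(mat):
--     if mat[1][1] not in (0, 5):
--         return False
--     flat = [v for row in mat for v in row]
--     for i in range(9):
--         for j in range(i + 1, 9):
--             for k in range(j + 1, 9):
--                 if i // 3 + k // 3 == 2 * (j // 3) and i % 3 + k % 3 == 2 * (j % 3):
--                     if flat[i] and flat[j] and flat[k] and flat[i] + flat[j] + flat[k] != 15:
--                         return False
--     return True
-- ===== Notes on version B (the rewrite author's own statement) =====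
-- stated objective: alternative
-- what changed: Flattens the grid to 9 cells and brute-forces all 84 index triples i<j<k, recognising the 8 winning lines by an arithmetic collinearity test (row and column coordinates both in arithmetic progression), instead of A's interleaved idx-loop plus hand-unrolled diagonal branches over the nested 3x3 structure.
-- outside the precondition, e.g. on has_hope([[4, 5, 6, 100], [0, 5, 0], [0, 0, 0]]): A returns False, B returns True
import Mathlib
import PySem

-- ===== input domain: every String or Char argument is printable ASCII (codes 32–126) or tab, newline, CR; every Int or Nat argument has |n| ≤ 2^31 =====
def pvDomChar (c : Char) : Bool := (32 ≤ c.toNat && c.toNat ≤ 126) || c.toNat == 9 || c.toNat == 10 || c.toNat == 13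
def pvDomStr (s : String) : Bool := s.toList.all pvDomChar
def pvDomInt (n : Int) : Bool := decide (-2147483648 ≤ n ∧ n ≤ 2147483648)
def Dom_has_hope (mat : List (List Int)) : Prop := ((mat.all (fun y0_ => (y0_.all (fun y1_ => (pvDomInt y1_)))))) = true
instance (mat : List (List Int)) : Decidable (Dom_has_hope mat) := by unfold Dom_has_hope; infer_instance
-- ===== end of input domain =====

-- B flattens the grid and brute-forces all 84 index triples, recognising the 8 winning
-- lines by an arithmetic collinearity test, instead of A's idx-loop plus unrolled branches.


-- ===== PORT A =====
-- mat[i][j]: Python raises IndexError out of range; Pre_ restricts to 3x3 matrices,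
-- where these literal nonnegative indices are in range and getD is exact.
def gA (mat : List (List Int)) (i j : Nat) : Int := (mat.getD i []).getD j 0

-- body of 'for idx in range(3)', threading the early 'return False' through a Bool accumulator
def stepA (mat : List (List Int)) (acc : Bool) (idx : Nat) : Bool :=
  if acc = false then false
  else
    let acc := if gA mat idx 0 ≠ 0 && gA mat idx 1 ≠ 0 && gA mat idx 2 ≠ 0 then
        (if (mat.getD idx []).foldl (· + ·) 0 ≠ 15 then false else acc) else acc
    if gA mat 0 idx ≠ 0 && gA mat 1 idx ≠ 0 && gA mat 2 idx ≠ 0 then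
        (if gA mat 0 idx + gA mat 1 idx + gA mat 2 idx ≠ 15 then false else acc) else acc

def has_hope (mat : List (List Int)) : Bool :=
  if ¬ (gA mat 1 1 = 0 ∨ gA mat 1 1 = 5) then false
  else
    let acc := [0, 1, 2].foldl (stepA mat) true
    let acc := if acc = false then false
      else if gA mat 0 0 ≠ 0 && gA mat 1 1 ≠ 0 && gA mat 2 2 ≠ 0 then
        (if gA mat 0 0 + gA mat 1 1 + gA mat 2 2 ≠ 15 then false else acc) else acc
    if acc = false then false
    else if gA mat 0 2 ≠ 0 && gA mat 1 1 ≠ 0 && gA mat 2 0 ≠ 0 then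
      (if gA mat 0 2 + gA mat 1 1 + gA mat 2 0 ≠ 15 then false else acc) else acc

-- ===== PORT B =====
-- flat[n]: under Pre_ the flattened grid has 9 cells, so getD with indices 0..8 is exact.
def gF (flat : List Int) (n : Nat) : Int := flat.getD n 0

-- the three nested 'for' loops with early 'return False' become nested .all over the
-- same ranges; the collinearity guard and the line check are transcribed verbatim.
def has_hope_alt (mat : List (List Int)) : Bool :=
  if ¬ (gA mat 1 1 = 0 ∨ gA mat 1 1 = 5) then false
  else
    let flat := mat.flatMap (fun row => row)
    (List.range 9).all (fun i =>
      (List.range' (i + 1) (9 - (i + 1))).all (fun j =>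
        (List.range' (j + 1) (9 - (j + 1))).all (fun k =>
          !((i / 3 + k / 3 == 2 * (j / 3) && i % 3 + k % 3 == 2 * (j % 3)) &&
            (gF flat i ≠ 0 && gF flat j ≠ 0 && gF flat k ≠ 0 &&
             gF flat i + gF flat j + gF flat k ≠ 15)))))

-- ===== PRECONDITION & SPEC =====
-- Pre_ admits (a) any matrix whose centre cell mat[1][1] exists but is not 0 or 5 —
-- there A returns False from its first check, touching nothing else — and (b) the
-- function's natural 3x3 domain.  Other inputs are excluded: on them A either raises
-- IndexError or returns a value shaped by summing whole over-long rows (see cites).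
def Pre_has_hope (mat : List (List Int)) : Prop :=
  (2 ≤ mat.length ∧ 2 ≤ (mat.getD 1 []).length ∧
    ¬ ((mat.getD 1 []).getD 1 0 = 0 ∨ (mat.getD 1 []).getD 1 0 = 5)) ∨
  (mat.length = 3 ∧ ∀ r ∈ mat, r.length = 3)
instance (mat : List (List Int)) : Decidable (Pre_has_hope mat) := by unfold Pre_has_hope; infer_instance

def pvWitness_has_hope : List (List Int) := [[2, 7, 6], [9, 5, 1], [4, 3, 8]]

def Spec_has_hope (mat : List (List Int)) (out : Bool) : Prop := out = has_hope_alt mat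
instance (mat : List (List Int)) (out : Bool) : Decidable (Spec_has_hope mat out) := by unfold Spec_has_hope; infer_instance

-- ===== CLAIM (what is proved, stated in full; the proofs are below) =====
def Claim_equal_has_hope : Prop := ∀ (mat : List (List Int)), Dom_has_hope mat → Pre_has_hope mat → Spec_has_hope mat (has_hope mat)

-- ===== LEMMAS AND PROOFS =====
-- canonical one-line checks used to characterise port A's accumulator threading
def rowOk (mat : List (List Int)) (idx : Nat) : Bool :=
  !((gA mat idx 0 ≠ 0 && gA mat idx 1 ≠ 0 && gA mat idx 2 ≠ 0) && decide ((mat.getD idx []).foldl (· + ·) 0 ≠ 15))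
def colOk (mat : List (List Int)) (idx : Nat) : Bool :=
  !((gA mat 0 idx ≠ 0 && gA mat 1 idx ≠ 0 && gA mat 2 idx ≠ 0) && decide (gA mat 0 idx + gA mat 1 idx + gA mat 2 idx ≠ 15))
def diag1Ok (mat : List (List Int)) : Bool :=
  !((gA mat 0 0 ≠ 0 && gA mat 1 1 ≠ 0 && gA mat 2 2 ≠ 0) && decide (gA mat 0 0 + gA mat 1 1 + gA mat 2 2 ≠ 15))
def diag2Ok (mat : List (List Int)) : Bool :=
  !((gA mat 0 2 ≠ 0 && gA mat 1 1 ≠ 0 && gA mat 2 0 ≠ 0) && decide (gA mat 0 2 + gA mat 1 1 + gA mat 2 0 ≠ 15))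

theorem stepA_eq (mat : List (List Int)) (acc : Bool) (idx : Nat) :
    stepA mat acc idx = (acc && rowOk mat idx && colOk mat idx) := by
  unfold stepA rowOk colOk
  cases acc
  · simp
  · cases h1 : (gA mat idx 0 ≠ 0 && gA mat idx 1 ≠ 0 && gA mat idx 2 ≠ 0) <;>
    cases h2 : (gA mat 0 idx ≠ 0 && gA mat 1 idx ≠ 0 && gA mat 2 idx ≠ 0) <;>
    by_cases h3 : (mat.getD idx []).foldl (· + ·) 0 ≠ 15 <;>
    by_cases h4 : gA mat 0 idx + gA mat 1 idx + gA mat 2 idx ≠ 15 <;>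
    simp [h1, h2, h3, h4]

theorem diag_guard (mat : List (List Int)) (acc : Bool) :
    (if acc = false then false
      else if gA mat 0 0 ≠ 0 && gA mat 1 1 ≠ 0 && gA mat 2 2 ≠ 0 then
        (if gA mat 0 0 + gA mat 1 1 + gA mat 2 2 ≠ 15 then false else acc) else acc)
    = (acc && diag1Ok mat) := by
  unfold diag1Ok
  cases acc
  · simp
  · cases h1 : (gA mat 0 0 ≠ 0 && gA mat 1 1 ≠ 0 && gA mat 2 2 ≠ 0) <;>
    by_cases h2 : gA mat 0 0 + gA mat 1 1 + gA mat 2 2 ≠ 15 <;> simp [h1, h2]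

theorem diag_guard2 (mat : List (List Int)) (acc : Bool) :
    (if acc = false then false
      else if gA mat 0 2 ≠ 0 && gA mat 1 1 ≠ 0 && gA mat 2 0 ≠ 0 then
        (if gA mat 0 2 + gA mat 1 1 + gA mat 2 0 ≠ 15 then false else acc) else acc)
    = (acc && diag2Ok mat) := by
  unfold diag2Ok
  cases acc
  · simp
  · cases h1 : (gA mat 0 2 ≠ 0 && gA mat 1 1 ≠ 0 && gA mat 2 0 ≠ 0) <;>
    by_cases h2 : gA mat 0 2 + gA mat 1 1 + gA mat 2 0 ≠ 15 <;> simp [h1, h2]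

theorem hasA_char (mat : List (List Int)) :
    has_hope mat = (decide (gA mat 1 1 = 0 ∨ gA mat 1 1 = 5) &&
      (rowOk mat 0 && colOk mat 0 && (rowOk mat 1 && colOk mat 1) && (rowOk mat 2 && colOk mat 2)
        && diag1Ok mat && diag2Ok mat)) := by
  unfold has_hope
  by_cases hc : gA mat 1 1 = 0 ∨ gA mat 1 1 = 5
  · simp only [hc, not_true, if_neg, List.foldl, stepA_eq, diag_guard, diag_guard2,
      decide_true, Bool.true_and, if_false]
    simp [Bool.and_assoc]
  · simp [hc]

theorem key (a b c d e f g h i : Int) :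
    has_hope [[a, b, c], [d, e, f], [g, h, i]] =
      has_hope_alt [[a, b, c], [d, e, f], [g, h, i]] := by
  rw [hasA_char]
  by_cases hc : e = 0 ∨ e = 5
  · simp only [has_hope_alt, gA, gF, rowOk, colOk, diag1Ok, diag2Ok, List.getD,
      List.getElem?_cons_zero, List.getElem?_cons_succ, Option.getD_some, List.flatMap,
      (show List.range 9 = [0, 1, 2, 3, 4, 5, 6, 7, 8] from rfl),
      List.range', List.all_cons, List.all_nil, List.foldl, zero_add, hc,
      decide_true, not_true, Bool.true_and, if_false, decide_not, Bool.decide_and,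
      Bool.decide_eq_true, Bool.and_true]
    norm_num
    simp only [Bool.and_assoc]
    ac_rfl
  · have h0 : e ≠ 0 := fun h => hc (Or.inl h)
    have h5 : e ≠ 5 := fun h => hc (Or.inr h)
    simp [has_hope_alt, gA, List.getD, h0, h5]

-- ===== VERDICT (by name: the statement is the Claim_ definition above) =====
theorem has_hope_spec : Claim_equal_has_hope := by
  intro mat _ hpre
  rcases hpre with ⟨_, _, hc⟩ | ⟨hlen, hrows⟩
  · show has_hope mat = has_hope_alt mat
    simp only [List.getD] at hc
    simp [has_hope, has_hope_alt, gA, List.getD, hc]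
  match mat, hlen with
  | [r0, r1, r2], _ =>
    have h0 := hrows r0 (by simp)
    have h1 := hrows r1 (by simp)
    have h2 := hrows r2 (by simp)
    match r0, h0, r1, h1, r2, h2 with
    | [a, b, c], _, [d, e, f], _, [g, h, i], _ =>
      exact key a b c d e f g h i
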